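-- pv_equiv track=rewrite | github.com/joshred1/Coding-Projects | Introductory Functions/lab3.py | min_diagonality
-- ===== SOURCE A (Python) =====
-- def diagonality(matrix):
--     d_list = []
--     for i in range(len(matrix)):
--         for j in range(len(matrix[i])):
--             if matrix[i][j] != 0:
--                 d_list.append(abs(i-j))
--     return max(d_list) + 1
--
-- def min_diagonality(matrix):
--     from itertools import permutations as p
--     list_of_d_lists = []
--     p_list = list(p(matrix))
--     for i in range(len(p_list)):
--         a_list = list(p_list[i])
--         list_of_d_lists.append(diagonality(a_list))
--     return min(list_of_d_lists)
-- ===== SOURCE B (Python) =====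
-- def row_span(row):
--     lo = None
--     hi = None
--     for j, x in enumerate(row):
--         if x != 0:
--             if lo is None:
--                 lo = j
--             hi = j
--     return None if lo is None else (lo, hi)
--
--
-- def min_diagonality(matrix):
--     # Branch over which row sits at each position, carrying a running max of
--     # max(i - lo, hi - i) per placed row (the row's bandwidth contribution),
--     # instead of materialising every permutation and rescanning the matrix.
--     spans = [row_span(row) for row in matrix]
--
--     def go(i, remaining, acc):
--         if not remaining:
--             return acc
--         return pick(i, [], remaining, acc)
--
--     def pick(i, pre, post, acc):
--         s = post[0]
--         rest = post[1:]
--         if s is None: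
--             c = acc
--         else:
--             c = max(acc, i - s[0], s[1] - i)
--         v = go(i + 1, pre + rest, c)
--         if rest:
--             return min(v, pick(i, pre + [s], rest, acc))
--         return v
--
--     return go(0, spans, 0) + 1
-- ===== Notes on version B (the rewrite author's own statement) =====
-- stated objective: faster
-- what changed: B precomputes each row's nonzero column span once and runs a recursive position-by-position assignment search with a running max, instead of materialising every row permutation and rescanning the whole matrix for each one.
import Mathlib
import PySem

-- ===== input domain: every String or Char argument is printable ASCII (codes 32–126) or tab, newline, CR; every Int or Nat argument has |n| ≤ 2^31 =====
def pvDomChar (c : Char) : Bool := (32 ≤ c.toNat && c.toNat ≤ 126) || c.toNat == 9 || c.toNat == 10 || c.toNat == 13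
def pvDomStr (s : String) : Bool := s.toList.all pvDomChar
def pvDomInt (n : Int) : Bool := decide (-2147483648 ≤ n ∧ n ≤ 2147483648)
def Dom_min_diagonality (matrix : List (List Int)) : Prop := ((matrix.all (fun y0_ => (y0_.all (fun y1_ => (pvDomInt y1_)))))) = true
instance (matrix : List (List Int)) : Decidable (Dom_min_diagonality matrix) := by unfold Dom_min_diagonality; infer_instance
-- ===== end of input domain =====

-- B replaces A's enumerate-all-permutations-and-rescan search by a branching
-- assignment search over precomputed per-row nonzero spans with a running max;
-- same return value on every input satisfying Pre_.

-- ===== PORT A =====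
def pvDiagonality (matrix : List (List Int)) : Int :=
  let d_list : List Int :=
    (PySem.List.pyRange 0 (matrix.length : Int) 1).foldl (fun acc i =>
      (PySem.List.pyRange 0 (((PySem.List.pyGetD matrix i []).length : Int)) 1).foldl
        (fun acc2 j =>
          if PySem.List.pyGetD (PySem.List.pyGetD matrix i []) j 0 ≠ 0 then
            acc2 ++ [|i - j|]
          else acc2) acc) []
  (PySem.List.max? d_list (fun y => y)).getD 0 + 1

def min_diagonality (matrix : List (List Int)) : Int :=
  let p_list := PySem.List.permutations matrix matrix.length
  let list_of_d_lists :=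
    (PySem.List.pyRange 0 (p_list.length : Int) 1).foldl
      (fun acc i => acc ++ [pvDiagonality (PySem.List.pyGetD p_list i [])]) []
  (PySem.List.min? list_of_d_lists (fun y => y)).getD 0

-- ===== PORT B =====
def pvRowSpan (row : List Int) : Option (Int × Int) :=
  (PySem.List.enumerate row 0).foldl
    (fun (st : Option (Int × Int)) (jx : Int × Int) =>
      if jx.2 ≠ 0 then
        match st with
        | none => some (jx.1, jx.1)
        | some (lo, _) => some (lo, jx.1)
      else st) none

mutual
def pvGo (i : Int) (remaining : List (Option (Int × Int))) (acc : Int) : Int :=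
  match remaining with
  | [] => acc
  | s :: rest => pvPick i [] (s :: rest) acc
  termination_by (remaining.length, remaining.length + 1)
  decreasing_by
    · simp [Prod.lex_def]
def pvPick (i : Int) (pre post : List (Option (Int × Int))) (acc : Int) : Int :=
  match post with
  | [] => acc
  | s :: rest =>
    let c : Int :=
      match s with
      | none => acc
      | some (lo, hi) => max acc (max (i - lo) (hi - i))
    let v := pvGo (i + 1) (pre ++ rest) c
    match rest with
    | [] => v
    | t :: ts => min v (pvPick i (pre ++ [s]) (t :: ts) acc)
  termination_by (pre.length + post.length, post.length)
  decreasing_by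
    · simp [Prod.lex_def, List.length_append]
    · simp [Prod.lex_def, List.length_append]; omega
end

def min_diagonality_alt (matrix : List (List Int)) : Int :=
  let spans := matrix.map pvRowSpan
  pvGo 0 spans 0 + 1

-- ===== PRECONDITION & SPEC =====
-- Pre_ excludes exactly the matrices with no nonzero entry (including the
-- empty matrix): there Python's max([]) raises ValueError inside diagonality.
def Pre_min_diagonality (matrix : List (List Int)) : Prop :=
  (matrix.any (fun r => r.any (fun x => x != 0))) = true
instance (matrix : List (List Int)) : Decidable (Pre_min_diagonality matrix) := by
  unfold Pre_min_diagonality; infer_instance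
def pvWitness_min_diagonality : List (List Int) := [[1, 0], [0, 2]]

def Spec_min_diagonality (matrix : List (List Int)) (out : Int) : Prop := out = min_diagonality_alt matrix
instance (matrix : List (List Int)) (out : Int) : Decidable (Spec_min_diagonality matrix out) := by unfold Spec_min_diagonality; infer_instance

-- ===== CLAIM (what is proved, stated in full; the proofs are below) =====
def Claim_equal_min_diagonality : Prop := ∀ (matrix : List (List Int)), Dom_min_diagonality matrix → Pre_min_diagonality matrix → Spec_min_diagonality matrix (min_diagonality matrix)

-- ===== LEMMAS AND PROOFS =====

-- mathematical scaffolding ---------------------------------------------------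
def pvCost (i : Int) (s : Option (Int × Int)) (acc : Int) : Int :=
  match s with
  | none => acc
  | some (lo, hi) => max acc (max (i - lo) (hi - i))

def pvChain (i acc : Int) (q : List (Option (Int × Int))) : Int :=
  match q with
  | [] => acc
  | s :: t => pvChain (i + 1) (pvCost i s acc) t

def pvRowMax (i acc j : Int) (row : List Int) : Int :=
  match row with
  | [] => acc
  | x :: t => pvRowMax i (if x ≠ 0 then max acc |i - j| else acc) (j + 1) t

def pvSpanF (st : Option (Int × Int)) (j : Int) (row : List Int) : Option (Int × Int) :=
  match row with
  | [] => st
  | x :: t =>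
    pvSpanF (if x ≠ 0 then (match st with | none => some (j, j) | some (lo, _) => some (lo, j)) else st)
      (j + 1) t

def pvDRow (i j : Int) (row : List Int) : List Int :=
  match row with
  | [] => []
  | x :: t => (if x ≠ 0 then [|i - j|] else []) ++ pvDRow i (j + 1) t

def pvDL (i : Int) (p : List (List Int)) : List Int :=
  match p with
  | [] => []
  | r :: t => pvDRow i 0 r ++ pvDL (i + 1) t

def pvM (i acc : Int) (p : List (List Int)) : Int :=
  match p with
  | [] => acc
  | r :: t => pvM (i + 1) (pvRowMax i acc 0 r) t

def pvNZ (p : List (List Int)) : Prop := ∃ r ∈ p, ∃ x ∈ r, x ≠ 0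

theorem pv_enum_cons {α : Type} (x : α) (t : List α) (s : Int) :
    PySem.List.enumerate (x :: t) s = (s, x) :: PySem.List.enumerate t (s + 1) := by
  simp [PySem.List.enumerate]

theorem pv_drow_fold (row : List Int) : ∀ (j : Int) (acc : List Int) (i : Int),
    (PySem.List.enumerate row j).foldl (fun a p => if p.2 ≠ 0 then a ++ [|i - p.1|] else a) acc
      = acc ++ pvDRow i j row := by
  induction row with
  | nil => intro j acc i; simp [PySem.List.enumerate, pvDRow]
  | cons x t ih =>
      intro j acc i
      rw [pv_enum_cons, List.foldl_cons]
      by_cases hx : x ≠ 0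
      · simp only [ih, pvDRow]
        simp [hx, List.append_assoc]
      · simp only [ih, pvDRow]
        simp at hx
        simp [hx]

theorem pv_row_fold (row : List Int) (i : Int) (acc : List Int) :
    (PySem.List.pyRange 0 ((row.length : Int)) 1).foldl
        (fun a j => if PySem.List.pyGetD row j 0 ≠ 0 then a ++ [|i - j|] else a) acc
      = acc ++ pvDRow i 0 row := by
  have h := pv_drow_fold row 0 acc i
  rw [PySem.List.enumerate_eq_map_pyRange row 0, List.foldl_map] at h
  simpa using h

theorem pv_outer_fold (p : List (List Int)) : ∀ (i0 : Int) (acc : List Int),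
    (PySem.List.enumerate p i0).foldl
        (fun a rp =>
          (PySem.List.pyRange 0 ((rp.2.length : Int)) 1).foldl
            (fun a2 j => if PySem.List.pyGetD rp.2 j 0 ≠ 0 then a2 ++ [|rp.1 - j|] else a2) a) acc
      = acc ++ pvDL i0 p := by
  induction p with
  | nil => intro i0 acc; simp [PySem.List.enumerate, pvDL]
  | cons r t ih =>
      intro i0 acc
      rw [pv_enum_cons, List.foldl_cons]
      show (PySem.List.enumerate t (i0+1)).foldl _ ((PySem.List.pyRange 0 ((r.length : Int)) 1).foldl _ acc) = _
      rw [pv_row_fold r i0 acc, ih, pvDL, List.append_assoc]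

theorem pv_rowmax_fold (row : List Int) : ∀ (j acc i : Int),
    List.foldl max acc (pvDRow i j row) = pvRowMax i acc j row := by
  induction row with
  | nil => intro j acc i; simp [pvDRow, pvRowMax]
  | cons x t ih =>
      intro j acc i
      by_cases hx : x ≠ 0
      · simp [pvDRow, pvRowMax, hx, ih]
      · simp at hx
        simp [pvDRow, pvRowMax, hx, ih]

theorem pv_m_fold (p : List (List Int)) : ∀ (i acc : Int),
    List.foldl max acc (pvDL i p) = pvM i acc p := by
  induction p with
  | nil => intro i acc; simp [pvDL, pvM]
  | cons r t ih =>
      intro i acc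
      rw [pvDL, pvM, List.foldl_append, pv_rowmax_fold, ih]

theorem pv_drow_nonneg (row : List Int) : ∀ (i j : Int), ∀ x ∈ pvDRow i j row, 0 ≤ x := by
  intro i j
  induction row generalizing j with
  | nil => simp [pvDRow]
  | cons x t ih =>
      intro y hy
      by_cases hx : x ≠ 0
      · simp [pvDRow, hx] at hy
        rcases hy with h | h
        · simp [h]
        · exact ih _ y h
      · simp at hx
        simp [pvDRow, hx] at hy
        exact ih _ y hy

theorem pv_dl_nonneg (p : List (List Int)) : ∀ (i : Int), ∀ x ∈ pvDL i p, 0 ≤ x := by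
  intro i
  induction p generalizing i with
  | nil => simp [pvDL]
  | cons r t ih =>
      intro y hy
      simp only [pvDL, List.mem_append] at hy
      rcases hy with h | h
      · exact pv_drow_nonneg r i 0 y h
      · exact ih _ y h

theorem pv_drow_ne (row : List Int) : ∀ (i j : Int), (∃ x ∈ row, x ≠ 0) → pvDRow i j row ≠ [] := by
  intro i j h
  induction row generalizing j with
  | nil => simp at h
  | cons x t ih =>
      by_cases hx : x ≠ 0
      · simp [pvDRow, hx]
      · simp at hx
        subst hx
        simp at h
        rcases h with ⟨y, hy, hyne⟩
        simp only [pvDRow]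
        simp
        exact ih (j+1) ⟨y, hy, hyne⟩

theorem pv_dl_ne (p : List (List Int)) : ∀ (i : Int), pvNZ p → pvDL i p ≠ [] := by
  intro i h
  induction p generalizing i with
  | nil => simp [pvNZ] at h
  | cons r t ih =>
      rcases h with ⟨r', hr', hx⟩
      rcases List.mem_cons.mp hr' with h | h
      · subst h
        rw [pvDL]
        intro hcon
        exact pv_drow_ne r' i 0 hx (List.append_eq_nil_iff.mp hcon).1
      · rw [pvDL]
        intro hcon
        exact ih (i+1) ⟨r', h, hx⟩ (List.append_eq_nil_iff.mp hcon).2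

theorem pv_diag_eq (p : List (List Int)) (h : pvNZ p) : pvDiagonality p = pvM 0 0 p + 1 := by
  have hd := pv_outer_fold p 0 []
  rw [PySem.List.enumerate_eq_map_pyRange p [], List.foldl_map] at hd
  simp only [List.nil_append] at hd
  have hne : pvDL 0 p ≠ [] := pv_dl_ne p 0 h
  rw [pvDiagonality]
  rw [show (PySem.List.pyRange 0 ((p.length : Int)) 1).foldl
      (fun acc i =>
        (PySem.List.pyRange 0 (((PySem.List.pyGetD p i []).length : Int)) 1).foldl
          (fun acc2 j =>
            if PySem.List.pyGetD (PySem.List.pyGetD p i []) j 0 ≠ 0 then acc2 ++ [|i - j|]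
            else acc2) acc) [] = pvDL 0 p from by simpa using hd]
  cases hdl : pvDL 0 p with
  | nil => exact absurd hdl hne
  | cons x t =>
      rw [PySem.List.max?_id_cons]
      simp only [Option.getD_some]
      have hx0 : 0 ≤ x := pv_dl_nonneg p 0 x (by rw [hdl]; exact List.mem_cons_self)
      have : pvM 0 0 p = t.foldl max x := by
        rw [← pv_m_fold, hdl, List.foldl_cons, max_eq_right hx0]
      rw [this]

theorem pvRowMax_cons (i acc j x : Int) (t : List Int) :
    pvRowMax i acc j (x :: t) = pvRowMax i (if x ≠ 0 then max acc |i - j| else acc) (j + 1) t := by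
  rw [pvRowMax.eq_def]

theorem pvSpanF_cons (st : Option (Int × Int)) (j x : Int) (t : List Int) :
    pvSpanF st j (x :: t)
      = pvSpanF
          (if x ≠ 0 then (match st with | none => some (j, j) | some (lo, _) => some (lo, j)) else st)
          (j + 1) t := by
  rw [pvSpanF.eq_def]

theorem pv_span_fold (row : List Int) : ∀ (j : Int) (st : Option (Int × Int)),
    (PySem.List.enumerate row j).foldl
        (fun (st : Option (Int × Int)) (jx : Int × Int) =>
          if jx.2 ≠ 0 then
            match st with
            | none => some (jx.1, jx.1)
            | some (lo, _) => some (lo, jx.1)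
          else st) st
      = pvSpanF st j row := by
  induction row with
  | nil => intro j st; simp [PySem.List.enumerate, pvSpanF]
  | cons x t ih =>
      intro j st
      rw [pv_enum_cons, List.foldl_cons, pvSpanF_cons]
      exact ih (j+1) _

theorem pv_span_inv (row : List Int) : ∀ (j : Int) (st : Option (Int × Int)),
    (∀ lo hi, st = some (lo, hi) → lo ≤ hi ∧ hi < j) →
    ∀ (i acc : Int), pvRowMax i (pvCost i st acc) j row = pvCost i (pvSpanF st j row) acc := by
  induction row with
  | nil => intro j st hst i acc; simp [pvRowMax, pvSpanF]
  | cons x t ih =>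
      intro j st hst i acc
      rw [pvRowMax_cons, pvSpanF_cons]
      by_cases hx : x ≠ 0
      · rw [if_pos hx, if_pos hx]
        cases st with
        | none =>
            rw [show max (pvCost i none acc) |i - j| = pvCost i (some (j, j)) acc from by
              simp [pvCost, abs_eq_max_neg, neg_sub]]
            exact ih (j+1) (some (j, j)) (by intro lo hi h; cases h; omega) i acc
        | some lohi =>
            rcases lohi with ⟨lo, hi⟩
            have hb := hst lo hi rfl
            rw [show max (pvCost i (some (lo, hi)) acc) |i - j| = pvCost i (some (lo, j)) acc from by
              simp only [pvCost, abs_eq_max_neg, neg_sub]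
              omega]
            exact ih (j+1) (some (lo, j)) (by intro lo' hi' h; cases h; omega) i acc
      · rw [if_neg hx, if_neg hx]
        exact ih (j+1) st (by intro lo hi h; rcases hst lo hi h with ⟨h1, h2⟩; omega) i acc

theorem pv_rowmax_cost (row : List Int) (i acc : Int) :
    pvRowMax i acc 0 row = pvCost i (pvRowSpan row) acc := by
  have h1 : pvRowSpan row = pvSpanF none 0 row := by
    rw [pvRowSpan, pv_span_fold]
  rw [h1]
  have := pv_span_inv row 0 none (by intro lo hi h; cases h) i acc
  simpa [pvCost] using this

theorem pv_chain_eq (p : List (List Int)) : ∀ (i acc : Int),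
    pvM i acc p = pvChain i acc (p.map pvRowSpan) := by
  induction p with
  | nil => intro i acc; simp [pvM, pvChain]
  | cons r t ih =>
      intro i acc
      rw [pvM, List.map_cons, pvChain, ih, pv_rowmax_cost]

theorem pvGo_nil (i acc : Int) : pvGo i [] acc = acc := by
  rw [pvGo]

theorem pvGo_cons (i acc : Int) (s : Option (Int × Int)) (rest : List (Option (Int × Int))) :
    pvGo i (s :: rest) acc = pvPick i [] (s :: rest) acc := by
  rw [pvGo]

theorem pvPick_one (i acc : Int) (pre : List (Option (Int × Int))) (s : Option (Int × Int)) :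
    pvPick i pre [s] acc = pvGo (i + 1) (pre ++ []) (pvCost i s acc) := by
  rw [pvPick.eq_def]
  cases s with
  | none => rfl
  | some lohi => rcases lohi with ⟨lo, hi⟩; rfl

theorem pvPick_cons2 (i acc : Int) (pre : List (Option (Int × Int))) (s t : Option (Int × Int))
    (ts : List (Option (Int × Int))) :
    pvPick i pre (s :: t :: ts) acc
      = min (pvGo (i + 1) (pre ++ (t :: ts)) (pvCost i s acc)) (pvPick i (pre ++ [s]) (t :: ts) acc) := by
  rw [pvPick.eq_def]
  cases s with
  | none => rfl
  | some lohi => rcases lohi with ⟨lo, hi⟩; rfl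

theorem pv_pick_le : ∀ (post pre : List (Option (Int × Int))) (i acc : Int) (k : Nat)
    (hk : k < post.length),
    pvPick i pre post acc ≤ pvGo (i + 1) (pre ++ post.eraseIdx k) (pvCost i post[k] acc) := by
  intro post
  induction post with
  | nil => intro pre i acc k hk; simp at hk
  | cons s rest ih =>
      intro pre i acc k hk
      cases rest with
      | nil =>
          obtain rfl : k = 0 := by simpa using hk
          rw [pvPick_one]
          simp
      | cons t ts =>
          rw [pvPick_cons2]
          cases k with
          | zero =>
              simpa using min_le_left _ _
          | succ k' =>
              have hk' : k' < (t :: ts).length := by simpa using hk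
              have h2 := ih (pre ++ [s]) i acc k' hk'
              refine le_trans (min_le_right _ _) (le_of_le_of_eq h2 ?_)
              rw [List.eraseIdx_cons_succ, List.getElem_cons_succ, List.append_assoc,
                List.singleton_append]

theorem pv_pick_ex : ∀ (post pre : List (Option (Int × Int))) (i acc : Int), post ≠ [] →
    ∃ k, ∃ hk : k < post.length,
      pvPick i pre post acc = pvGo (i + 1) (pre ++ post.eraseIdx k) (pvCost i post[k] acc) := by
  intro post
  induction post with
  | nil => intro pre i acc h; exact absurd rfl h
  | cons s rest ih =>
      intro pre i acc _
      cases rest with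
      | nil =>
          exact ⟨0, by simp, by rw [pvPick_one]; simp⟩
      | cons t ts =>
          rw [pvPick_cons2]
          rcases le_total (pvGo (i + 1) (pre ++ (t :: ts)) (pvCost i s acc))
              (pvPick i (pre ++ [s]) (t :: ts) acc) with hle | hle
          · refine ⟨0, by simp, ?_⟩
            simpa using min_eq_left hle
          · rcases ih (pre ++ [s]) i acc (by simp) with ⟨k', hk', heq⟩
            refine ⟨k' + 1, by simpa using hk', ?_⟩
            rw [min_eq_right hle, heq, List.eraseIdx_cons_succ, List.getElem_cons_succ,
              List.append_assoc, List.singleton_append]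

theorem pv_go_le : ∀ (n : Nat) (rem : List (Option (Int × Int))), rem.length = n →
    ∀ (i acc : Int) (q : List (Option (Int × Int))), q.Perm rem →
      pvGo i rem acc ≤ pvChain i acc q := by
  intro n
  induction n with
  | zero =>
      intro rem hlen i acc q hq
      have : rem = [] := List.length_eq_zero_iff.mp hlen
      subst this
      have : q = [] := List.Perm.eq_nil hq
      subst this
      rw [pvGo_nil, pvChain]
  | succ m ih =>
      intro rem hlen i acc q hq
      cases rem with
      | nil => simp at hlen
      | cons s rest =>
          cases q with
          | nil => exact absurd (List.Perm.eq_nil hq.symm) (by simp)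
          | cons a q' =>
              have ha : a ∈ s :: rest := hq.subset List.mem_cons_self
              rcases List.getElem_of_mem ha with ⟨k, hk, hak⟩
              have hperm2 : ((s :: rest)[k] :: (s :: rest).eraseIdx k).Perm (s :: rest) :=
                List.getElem_cons_eraseIdx_perm hk
              have hq' : q'.Perm ((s :: rest).eraseIdx k) := by
                have h3 : (a :: q').Perm (a :: (s :: rest).eraseIdx k) := by
                  refine hq.trans ?_
                  rw [← hak]
                  exact hperm2.symm
                exact h3.cons_inv
              have hlen' : ((s :: rest).eraseIdx k).length = m := by
                rw [List.length_eraseIdx_of_lt hk]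
                simpa using hlen
              have hstep := pv_pick_le (s :: rest) [] i acc k hk
              rw [List.nil_append] at hstep
              rw [pvGo_cons]
              refine le_trans hstep ?_
              have := ih ((s :: rest).eraseIdx k) hlen' (i + 1) (pvCost i (s :: rest)[k] acc) q' hq'
              rw [pvChain, ← hak]
              exact this

theorem pv_go_ex : ∀ (n : Nat) (rem : List (Option (Int × Int))), rem.length = n →
    ∀ (i acc : Int), ∃ q, q.Perm rem ∧ pvGo i rem acc = pvChain i acc q := by
  intro n
  induction n with
  | zero =>
      intro rem hlen i acc
      have : rem = [] := List.length_eq_zero_iff.mp hlen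
      subst this
      exact ⟨[], List.Perm.refl _, by rw [pvGo_nil, pvChain]⟩
  | succ m ih =>
      intro rem hlen i acc
      cases rem with
      | nil => simp at hlen
      | cons s rest =>
          rcases pv_pick_ex (s :: rest) [] i acc (by simp) with ⟨k, hk, heq⟩
          have hlen' : ((s :: rest).eraseIdx k).length = m := by
            rw [List.length_eraseIdx_of_lt hk]
            simpa using hlen
          rcases ih ((s :: rest).eraseIdx k) hlen' (i + 1) (pvCost i (s :: rest)[k] acc)
            with ⟨q', hq', heq'⟩
          refine ⟨(s :: rest)[k] :: q', ?_, ?_⟩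
          · exact (hq'.cons (s :: rest)[k]).trans (List.getElem_cons_eraseIdx_perm hk)
          · rw [pvGo_cons, heq, List.nil_append, heq', pvChain]

theorem pv_mem_permutations {α : Type} : ∀ (q l : List α), q.Perm l →
    q ∈ PySem.List.permutations l l.length := by
  intro q
  induction q with
  | nil =>
      intro l hq
      have : l = [] := (List.Perm.eq_nil hq.symm)
      subst this
      simp [PySem.List.permutations_zero]
  | cons a q' ih =>
      intro l hq
      have hlen : l.length = q'.length + 1 := by
        rw [← hq.length_eq]; simp
      have ha : a ∈ l := hq.subset List.mem_cons_self
      rcases List.getElem_of_mem ha with ⟨k, hk, hak⟩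
      have hq' : q'.Perm (l.eraseIdx k) := by
        have h3 : (a :: q').Perm (a :: l.eraseIdx k) := by
          refine hq.trans ?_
          rw [← hak]
          exact (List.getElem_cons_eraseIdx_perm hk).symm
        exact h3.cons_inv
      have hlen' : (l.eraseIdx k).length = q'.length := by
        rw [List.length_eraseIdx_of_lt hk, hlen]
        omega
      have hmem : q' ∈ PySem.List.permutations (l.eraseIdx k) (l.eraseIdx k).length :=
        ih (l.eraseIdx k) hq'
      rw [hlen, PySem.List.permutations]
      simp only [List.mem_flatMap, List.mem_range]
      refine ⟨k, hk, ?_⟩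
      rw [List.getElem?_eq_getElem hk, hak]
      simp only [List.mem_map]
      rw [hlen'] at hmem
      exact ⟨q', hmem, rfl⟩

theorem pv_nz_perm {p q : List (List Int)} (h : q.Perm p) (hn : pvNZ p) : pvNZ q := by
  rcases hn with ⟨r, hr, hx⟩
  exact ⟨r, (h.mem_iff).mpr hr, hx⟩

theorem pv_pre_nz (matrix : List (List Int)) (h : Pre_min_diagonality matrix) : pvNZ matrix := by
  rw [Pre_min_diagonality] at h
  simp only [List.any_eq_true, bne_iff_ne] at h
  exact h

theorem pv_perm_map_lift {α β : Type} (f : α → β) : ∀ (q : List β) (l : List α),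
    q.Perm (l.map f) → ∃ p : List α, p.Perm l ∧ p.map f = q := by
  intro q
  induction q with
  | nil =>
      intro l h
      have : l.map f = [] := List.Perm.eq_nil h.symm
      exact ⟨l, List.Perm.refl _, this⟩
  | cons b q' ih =>
      intro l h
      have hb : b ∈ l.map f := h.subset List.mem_cons_self
      rcases List.getElem_of_mem hb with ⟨k, hk, hbk⟩
      have hkl : k < l.length := by simpa using hk
      have hq' : q'.Perm ((l.eraseIdx k).map f) := by
        have h3 : (b :: q').Perm (b :: (l.map f).eraseIdx k) := by
          refine h.trans ?_
          rw [← hbk]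
          exact (List.getElem_cons_eraseIdx_perm hk).symm
        rw [List.eraseIdx_map] at h3
        exact h3.cons_inv
      rcases ih (l.eraseIdx k) hq' with ⟨p', hp', hpm⟩
      refine ⟨l[k] :: p', (hp'.cons l[k]).trans (List.getElem_cons_eraseIdx_perm hkl), ?_⟩
      rw [List.map_cons, hpm]
      rw [List.getElem_map] at hbk
      rw [hbk]

theorem pv_a_eq_min (matrix : List (List Int)) :
    min_diagonality matrix =
      (PySem.List.min? ((PySem.List.permutations matrix matrix.length).map pvDiagonality)
          (fun y => y)).getD 0 := by
  rw [min_diagonality]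
  rw [PySem.List.foldl_pyRange_zero_pyGetD' (PySem.List.permutations matrix matrix.length) []
    (fun acc x => acc ++ [pvDiagonality x]) []]
  rw [PySem.List.foldl_append_singleton_eq_map]
  simp

-- ===== VERDICT (by name: the statement is the Claim_ definition above) =====
theorem min_diagonality_spec : Claim_equal_min_diagonality := by
  intro matrix hdom hpre
  have hnz := pv_pre_nz matrix hpre
  show min_diagonality matrix = min_diagonality_alt matrix
  rw [pv_a_eq_min]
  have hmm : matrix ∈ PySem.List.permutations matrix matrix.length :=
    pv_mem_permutations matrix matrix (List.Perm.refl _)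
  have hlodmem : pvDiagonality matrix ∈
      (PySem.List.permutations matrix matrix.length).map pvDiagonality :=
    List.mem_map_of_mem hmm
  cases hm : PySem.List.min? ((PySem.List.permutations matrix matrix.length).map pvDiagonality)
      (fun y => y) with
  | none =>
      rw [PySem.List.min?_eq_none_iff] at hm
      rw [hm] at hlodmem
      simp at hlodmem
  | some m =>
      rcases List.mem_map.mp (PySem.List.min?_mem hm) with ⟨p0, hp0mem, hp0⟩
      have hp0perm : p0.Perm matrix := PySem.List.perm_of_mem_permutations hp0mem
      have hnz0 : pvNZ p0 := pv_nz_perm hp0perm hnz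
      -- lower bound: B + 1 ≤ m
      have hlow : pvGo 0 (matrix.map pvRowSpan) 0 + 1 ≤ m := by
        have h1 : pvGo 0 (matrix.map pvRowSpan) 0 ≤ pvChain 0 0 (p0.map pvRowSpan) :=
          pv_go_le (matrix.map pvRowSpan).length (matrix.map pvRowSpan) rfl 0 0
            (p0.map pvRowSpan) (hp0perm.map _)
        have h2 : pvDiagonality p0 = pvChain 0 0 (p0.map pvRowSpan) + 1 := by
          rw [pv_diag_eq p0 hnz0, pv_chain_eq]
        omega
      -- upper bound: m ≤ B + 1
      have hup : m ≤ pvGo 0 (matrix.map pvRowSpan) 0 + 1 := by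
        rcases pv_go_ex (matrix.map pvRowSpan).length (matrix.map pvRowSpan) rfl 0 0
          with ⟨q0, hq0perm, hq0⟩
        rcases pv_perm_map_lift pvRowSpan q0 matrix hq0perm with ⟨p1, hp1perm, hp1map⟩
        have hp1mem := pv_mem_permutations p1 matrix hp1perm
        have hmemlod : pvDiagonality p1 ∈
            (PySem.List.permutations matrix matrix.length).map pvDiagonality :=
          List.mem_map_of_mem hp1mem
        have hmin := PySem.List.min?_isMin hm (pvDiagonality p1) hmemlod
        have h2 : pvDiagonality p1 = pvGo 0 (matrix.map pvRowSpan) 0 + 1 := by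
          rw [pv_diag_eq p1 (pv_nz_perm hp1perm hnz), pv_chain_eq, hp1map, ← hq0]
        omega
      have : m = pvGo 0 (matrix.map pvRowSpan) 0 + 1 := le_antisymm hup hlow
      rw [Option.getD_some, this]
      rfl
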